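-- pv_equiv track=rewrite | github.com/edelvalle/django-datalog | djdatalog/query.py | _unify_bindings
-- ===== SOURCE A (Python) =====
-- from typing import Any
--
-- def _unify_bindings(existing: dict, new: dict) -> dict[str, Any] | None:
--     """Try to unify two sets of variable bindings."""
--     result = existing.copy()
--     for var, value in new.items():
--         if var in result:
--             if result[var] != value:
--                 return None  # Conflict
--         else:
--             result[var] = value
--     return result
-- ===== SOURCE B (Python) =====
-- def _unify_bindings(existing: dict, new: dict):
--     """Try to unify two sets of variable bindings."""
--     # Group-by: collect every value bound to each variable, then a variable is
--     # unifiable iff its group holds a single distinct value; the result maps each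
--     # variable (in first-occurrence order) to its first bound value.
--     groups = {}
--     for var, value in [*existing.items(), *new.items()]:
--         groups.setdefault(var, []).append(value)
--     if any(len(set(vs)) > 1 for vs in groups.values()):
--         return None  # Conflict
--     return {var: vs[0] for var, vs in groups.items()}
-- ===== Notes on version B (the rewrite author's own statement) =====
-- stated objective: alternative
-- what changed: Replaces A's incremental copy-and-insert loop over new with a group-by algorithm: one pass builds a multimap variable -> list of all bound values from both dicts, a conflict is a group with more than one distinct value, and otherwise each group's first value is the result.
import Mathlib
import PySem

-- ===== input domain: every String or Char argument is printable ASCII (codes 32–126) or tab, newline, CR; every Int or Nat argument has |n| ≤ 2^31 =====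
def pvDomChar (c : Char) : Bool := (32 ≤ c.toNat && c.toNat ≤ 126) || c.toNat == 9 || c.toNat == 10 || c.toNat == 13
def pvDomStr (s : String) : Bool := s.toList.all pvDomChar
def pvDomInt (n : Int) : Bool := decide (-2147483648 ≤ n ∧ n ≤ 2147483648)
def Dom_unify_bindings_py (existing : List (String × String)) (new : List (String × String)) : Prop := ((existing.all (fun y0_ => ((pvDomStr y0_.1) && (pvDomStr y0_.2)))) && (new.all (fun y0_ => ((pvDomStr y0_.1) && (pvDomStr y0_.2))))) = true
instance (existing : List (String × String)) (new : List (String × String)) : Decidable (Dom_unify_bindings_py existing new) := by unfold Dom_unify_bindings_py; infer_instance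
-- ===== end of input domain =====

-- B is an alternative algorithm: instead of A's incremental copy-and-insert loop, B groups
-- every bound value by its variable (a multimap built in one pass over both dicts' items),
-- reports a conflict iff some group holds more than one distinct value, and otherwise maps
-- each group to its first value; return values agree everywhere.

-- ===== PORT A =====
-- 'for var, value in new.items(): …' with early 'return None' on a conflicting binding
def unifyLoopA : List (String × String) → PySem.Dict String String → Option (PySem.Dict String String)
  | [], result => some result
  | (var, value) :: rest, result =>
    if result.contains var then
      if result.get? var ≠ some value then none  -- Conflict
      else unifyLoopA rest result
    else unifyLoopA rest (result.insert var value)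

def unify_bindings_py (existing : List (String × String)) (new : List (String × String)) : Option (List (String × String)) :=
  let existingD := PySem.Dict.ofList existing
  let newD := PySem.Dict.ofList new
  -- result = existing.copy(), then the loop over new.items()
  (unifyLoopA newD.items existingD).map (·.items)

-- ===== PORT B =====
def unify_bindings_py_alt (existing : List (String × String)) (new : List (String × String)) : Option (List (String × String)) :=
  let e := PySem.Dict.ofList existing
  let n := PySem.Dict.ofList new
  -- 'for var, value in [*existing.items(), *new.items()]: groups.setdefault(var, []).append(value)'
  let groups := (e.items ++ n.items).foldl (fun g p => g.modify p.1 [] (· ++ [p.2])) PySem.Dict.empty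
  -- 'any(len(set(vs)) > 1 for vs in groups.values())'
  if groups.items.any (fun p => 1 < (PySem.Set.ofList p.2).length) then none  -- Conflict
  -- '{var: vs[0] for var, vs in groups.items()}' — every group is nonempty, so vs[0] = headD ""
  else some (groups.items.map (fun p => (p.1, p.2.headD "")))

-- ===== PRECONDITION & SPEC =====
def Spec_unify_bindings_py (existing : List (String × String)) (new : List (String × String)) (out : Option (List (String × String))) : Prop := out = unify_bindings_py_alt existing new
instance (existing : List (String × String)) (new : List (String × String)) (out : Option (List (String × String))) : Decidable (Spec_unify_bindings_py existing new out) := by unfold Spec_unify_bindings_py; infer_instance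

-- ===== CLAIM (what is proved, stated in full; the proofs are below) =====
def Claim_equal_unify_bindings_py : Prop := ∀ (existing : List (String × String)) (new : List (String × String)), Dom_unify_bindings_py existing new → Spec_unify_bindings_py existing new (unify_bindings_py existing new)

-- ===== LEMMAS AND PROOFS =====

-- first value bound to k in an association list (= PySem.Dict.get? read off the items list)
def lkp (k : String) (l : List (String × String)) : Option String :=
  (l.find? (fun p => p.1 == k)).map (·.2)

lemma get?_eq_lkp (d : PySem.Dict String String) (k : String) : d.get? k = lkp k d.items := rfl

lemma lkp_cons (k a b : String) (l : List (String × String)) :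
    lkp k ((a, b) :: l) = if a = k then some b else lkp k l := by
  by_cases h : a = k
  · rw [if_pos h, lkp, List.find?_cons_of_pos (by simpa using h)]
    rfl
  · rw [if_neg h, lkp, List.find?_cons_of_neg (by simpa using h), lkp]

lemma lkp_isSome_iff (k : String) (l : List (String × String)) :
    (lkp k l).isSome ↔ k ∈ l.map Prod.fst := by
  simp [lkp, List.find?_isSome]

lemma lkp_eq_none_of_not_mem (k : String) (l : List (String × String))
    (h : k ∉ l.map Prod.fst) : lkp k l = none := by
  rw [← Option.not_isSome_iff_eq_none]
  intro hs
  exact h ((lkp_isSome_iff k l).mp hs)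

lemma mem_of_lkp_eq_some (k w : String) (l : List (String × String))
    (h : lkp k l = some w) : (k, w) ∈ l := by
  induction l with
  | nil => exact absurd h (by simp [lkp])
  | cons q rest ih =>
    obtain ⟨a, b⟩ := q
    rw [lkp_cons] at h
    by_cases ha : a = k
    · rw [if_pos ha] at h
      obtain rfl : b = w := by simpa using h
      exact List.mem_cons.mpr (Or.inl (by rw [ha]))
    · exact List.mem_cons.mpr (Or.inr (ih (by rwa [if_neg ha] at h)))

lemma lkp_of_mem (l : List (String × String)) (p : String × String)
    (hnd : (l.map Prod.fst).Nodup) (hp : p ∈ l) : lkp p.1 l = some p.2 := by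
  obtain ⟨p1, p2⟩ := p
  induction l with
  | nil => cases hp
  | cons q rest ih =>
    obtain ⟨q1, q2⟩ := q
    simp only [List.map_cons, List.nodup_cons] at hnd
    rcases List.mem_cons.mp hp with h | h
    · injection h with h1 h2
      subst h1; subst h2
      rw [lkp_cons, if_pos rfl]
    · rw [lkp_cons]
      have hne : q1 ≠ p1 := by
        intro he
        exact hnd.1 (he ▸ (List.mem_map_of_mem (f := Prod.fst) h : p1 ∈ _))
      rw [if_neg hne]
      exact ih hnd.2 h

lemma filter_key_eq_nil (k : String) (l : List (String × String))
    (h : k ∉ l.map Prod.fst) : l.filter (fun p => p.1 == k) = [] := by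
  induction l with
  | nil => rfl
  | cons q rest ih =>
    simp only [List.map_cons, List.mem_cons, not_or] at h
    have hq : (q.1 == k) = false := beq_eq_false_iff_ne.mpr (fun hh => h.1 hh.symm)
    rw [List.filter_cons_of_neg (by simp [hq]), ih h.2]

lemma filter_key_eq_lkp_toList (k : String) (l : List (String × String))
    (hnd : (l.map Prod.fst).Nodup) :
    (l.filter (fun p => p.1 == k)).map (·.2) = (lkp k l).toList := by
  induction l with
  | nil => rfl
  | cons q rest ih =>
    obtain ⟨a, b⟩ := q
    simp only [List.map_cons, List.nodup_cons] at hnd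
    by_cases h : a = k
    · rw [lkp_cons, if_pos h]
      have hb : ((a, b).1 == k) = true := by simpa using h
      have hrest : rest.filter (fun p => p.1 == k) = [] :=
        filter_key_eq_nil k rest (h ▸ hnd.1)
      rw [List.filter_cons_of_pos (by simp [hb]), hrest]
      simp
    · rw [lkp_cons, if_neg h]
      have hab : ((a, b).1 == k) = false := by simpa using h
      rw [List.filter_cons_of_neg (by simp [hab])]
      exact ih hnd.2

lemma get?_update (ln : List (String × String)) (e : PySem.Dict String String)
    (hnd : (ln.map Prod.fst).Nodup) (k : String) :
    (e.update ln).get? k = (lkp k ln).or (e.get? k) := by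
  induction ln generalizing e with
  | nil => rfl
  | cons p rest ih =>
    obtain ⟨a, b⟩ := p
    simp only [List.map_cons, List.nodup_cons] at hnd
    show ((e.insert a b).update rest).get? k = _
    rw [ih (e.insert a b) hnd.2, lkp_cons]
    by_cases h : a = k
    · subst h
      rw [lkp_eq_none_of_not_mem a rest hnd.1, if_pos rfl]
      simp [PySem.Dict.get?_insert_self]
    · rw [if_neg h, PySem.Dict.get?_insert_of_ne e b (Ne.symm h)]

-- inserting a binding a dict already holds is a no-op
lemma insert_eq_self_of_get? (d : PySem.Dict String String) (k v : String)
    (hnd : d.keys.Nodup) (h : d.get? k = some v) : d.insert k v = d := by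
  apply PySem.Dict.ext
  rw [PySem.Dict.items_insert_of_contains]
  · conv_rhs => rw [← List.map_id d.items]
    apply List.map_congr_left
    intro p hp
    by_cases hk : p.1 == k
    · have := PySem.Dict.get?_of_mem_items (d := d) (k := p.1) (v := p.2) hp hnd
      rw [eq_of_beq hk, h] at this
      simp only [hk, if_pos]
      obtain ⟨p1, p2⟩ := p
      simp_all
    · simp [hk]
  · simp [PySem.Dict.contains_eq_isSome_get?, h]

-- the loop of A, on a list of pairs with distinct keys, equals: none if some pair conflicts
-- with the start dict, else the start dict updated with all the pairs
lemma unifyLoopA_eq (l : List (String × String)) (r : PySem.Dict String String)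
    (hnd : (l.map Prod.fst).Nodup) (hr : r.keys.Nodup) :
    unifyLoopA l r =
      if l.any (fun p => r.contains p.1 && decide (r.get? p.1 ≠ some p.2)) then none
      else some (r.update l) := by
  induction l generalizing r with
  | nil => rfl
  | cons p rest ih =>
    obtain ⟨var, value⟩ := p
    simp only [List.map_cons, List.nodup_cons] at hnd
    show unifyLoopA ((var, value) :: rest) r = _
    rw [unifyLoopA]
    by_cases hc : r.contains var
    · rw [if_pos hc]
      obtain ⟨w, hw⟩ : ∃ w, r.get? var = some w := by
        rw [PySem.Dict.contains_eq_isSome_get?] at hc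
        exact Option.isSome_iff_exists.mp hc
      by_cases hv : w = value
      · subst hv
        rw [if_neg (by simp [hw]), ih r hnd.2 hr,
            show PySem.Dict.update r ((var, w) :: rest) = PySem.Dict.update (r.insert var w) rest from rfl,
            insert_eq_self_of_get? r var w hr hw]
        have hx : (r.contains var && decide (¬ r.get? var = some w)) = false := by
          rw [hw]; simp
        rw [List.any_cons, hx, Bool.false_or]
      · rw [if_pos (by simp [hw, hv])]
        simp [hc, hw, hv]
    · rw [if_neg hc, ih _ hnd.2 (PySem.Dict.nodup_keys_insert r var value hr)]
      have hcongr : ∀ p ∈ rest,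
          ((r.insert var value).contains p.1 && decide ((r.insert var value).get? p.1 ≠ some p.2))
            = (r.contains p.1 && decide (r.get? p.1 ≠ some p.2)) := by
        intro q hq
        have hne : q.1 ≠ var := fun h => hnd.1 (h ▸ List.mem_map_of_mem hq)
        have hb : (q.1 == var) = false := beq_eq_false_iff_ne.mpr hne
        simp [PySem.Dict.get?_insert, PySem.Dict.contains_insert, hne, hb]
      have hany : (rest.any fun p =>
            (r.insert var value).contains p.1 && decide ((r.insert var value).get? p.1 ≠ some p.2))
          = rest.any fun p => r.contains p.1 && decide (r.get? p.1 ≠ some p.2) := by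
        rw [Bool.eq_iff_iff, List.any_eq_true, List.any_eq_true]
        constructor <;> rintro ⟨x, hx, h⟩ <;>
          exact ⟨x, hx, by rw [hcongr x hx] at *; assumption⟩
      rw [hany,
        show r.update ((var, value) :: rest) = (r.insert var value).update rest from rfl]
      have hx : (r.contains var && decide (¬ r.get? var = some value)) = false := by
        rw [Bool.not_eq_true] at hc; rw [hc]; simp
      rw [List.any_cons, hx, Bool.false_or]

-- a two-option group has more than one distinct value iff both options are set and differ
lemma set_card_gt_one_iff (o1 o2 : Option String) :
    1 < (PySem.Set.ofList (o1.toList ++ o2.toList)).length ↔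
      ∃ v w, o1 = some v ∧ o2 = some w ∧ v ≠ w := by
  cases o1 with
  | none => cases o2 <;> simp [PySem.Set.ofList, PySem.Set.add]
  | some v =>
    cases o2 with
    | none => simp [PySem.Set.ofList, PySem.Set.add]
    | some w =>
      by_cases h : v = w
      · simp [PySem.Set.ofList, PySem.Set.add, h]
      · have h' : ¬ w = v := fun hh => h hh.symm
        simp [PySem.Set.ofList, PySem.Set.add, h, h']

theorem unify_bindings_py_spec : Claim_equal_unify_bindings_py := by
  intro existing new _
  unfold Spec_unify_bindings_py unify_bindings_py unify_bindings_py_alt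
  simp only []
  set e := PySem.Dict.ofList existing with he
  set n := PySem.Dict.ofList new with hn
  have hle : (e.items.map Prod.fst).Nodup := PySem.Dict.nodup_keys_ofList existing
  have hln : (n.items.map Prod.fst).Nodup := PySem.Dict.nodup_keys_ofList new
  set groups := (e.items ++ n.items).foldl (fun g p => g.modify p.1 [] (· ++ [p.2])) PySem.Dict.empty with hg
  -- the groups dict: keys in first-occurrence order, each mapped to all its values
  have hkeys : groups.keys = PySem.Set.ofList ((e.items ++ n.items).map Prod.fst) := by
    rw [hg, PySem.Dict.keys_foldl_modify_key (e.items ++ n.items) Prod.fst []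
      (fun _ p => (· ++ [p.2])) PySem.Dict.empty]
    simp only [PySem.Dict.keys_empty]
    exact PySem.Set.update_nil_left _
  have hgnd : groups.keys.Nodup := by rw [hkeys]; exact PySem.Set.nodup_ofList _
  have hgetD : ∀ k, groups.getD k [] = (lkp k e.items).toList ++ (lkp k n.items).toList := by
    intro k
    rw [hg, PySem.Dict.getD_foldl_modify_append, List.filter_append, List.map_append,
      filter_key_eq_lkp_toList k e.items hle, filter_key_eq_lkp_toList k n.items hln]
    simp
  have hitems : groups.items = groups.keys.map (fun k => (k, groups.getD k [])) :=
    PySem.Dict.items_eq_map_keys groups hgnd []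
  -- the two conflict conditions agree
  have hcond : (groups.items.any (fun p => 1 < (PySem.Set.ofList p.2).length))
      = (n.items.any fun p => e.contains p.1 && decide (e.get? p.1 ≠ some p.2)) := by
    rw [Bool.eq_iff_iff, List.any_eq_true, List.any_eq_true]
    constructor
    · rintro ⟨p, hp, hlt⟩
      rw [hitems] at hp
      obtain ⟨k, _, rfl⟩ := List.mem_map.mp hp
      rw [hgetD k] at hlt
      simp only [decide_eq_true_eq] at hlt
      obtain ⟨v, w, hv, hw, hne⟩ := (set_card_gt_one_iff _ _).mp hlt
      refine ⟨(k, w), mem_of_lkp_eq_some k w n.items hw, ?_⟩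
      have hc : e.contains k := by
        rw [PySem.Dict.contains_eq_isSome_get?, get?_eq_lkp, hv]; rfl
      simp [hc, get?_eq_lkp, hv, hne]
    · rintro ⟨p, hp, h⟩
      simp only [Bool.and_eq_true, decide_eq_true_eq] at h
      obtain ⟨v, hv⟩ : ∃ v, e.get? p.1 = some v := by
        rw [PySem.Dict.contains_eq_isSome_get?] at h
        exact Option.isSome_iff_exists.mp h.1
      have hw : lkp p.1 n.items = some p.2 := lkp_of_mem n.items p hln hp
      refine ⟨(p.1, groups.getD p.1 []), ?_, ?_⟩
      · rw [hitems]
        refine List.mem_map.mpr ⟨p.1, ?_, rfl⟩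
        rw [hkeys]
        exact (PySem.Set.mem_ofList _ _).mpr (by
          simp only [List.map_append, List.mem_append]
          exact Or.inr (List.mem_map_of_mem hp))
      · rw [hgetD p.1]
        simp only [decide_eq_true_eq]
        refine (set_card_gt_one_iff _ _).mpr ⟨v, p.2, ?_, hw, ?_⟩
        · rw [← get?_eq_lkp, hv]
        · intro hew; exact h.2 (by rw [hv, hew])
  rw [unifyLoopA_eq n.items e hln (by exact hle), hcond]
  by_cases hb : (n.items.any fun p => e.contains p.1 && decide (e.get? p.1 ≠ some p.2)) = true
  · rw [if_pos hb, if_pos hb]; rfl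
  · rw [if_neg hb, if_neg hb]
    -- no conflict: every shared variable is bound to the same value on both sides
    have hnc : ∀ k v w, lkp k e.items = some v → lkp k n.items = some w → v = w := by
      intro k v w hv hw
      by_contra hne
      apply hb
      rw [List.any_eq_true]
      refine ⟨(k, w), mem_of_lkp_eq_some k w n.items hw, ?_⟩
      have hc : e.contains k := by
        rw [PySem.Dict.contains_eq_isSome_get?, get?_eq_lkp, hv]; rfl
      simp [hc, get?_eq_lkp, hv, hne]
    simp only [Option.map_some, Option.some.injEq]
    -- both results list the same keys in the same order …
    have hukeys : (e.update n.items).keys = PySem.Set.update e.keys (n.items.map Prod.fst) :=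
      PySem.Dict.keys_foldl_insert_key n.items Prod.fst (fun _ p => p.2) e
    have hgkeys : groups.keys = PySem.Set.update e.keys (n.items.map Prod.fst) := by
      rw [hkeys, List.map_append, PySem.Set.ofList_append,
        PySem.Set.ofList_eq_self_of_nodup _ hle]
      rfl
    have hund : (e.update n.items).keys.Nodup :=
      PySem.Dict.nodup_keys_update e n.items (by exact hle)
    rw [PySem.Dict.items_eq_map_keys (e.update n.items) hund "", hitems, List.map_map,
      hukeys, hgkeys]
    -- … and bind each key to the same value
    apply List.map_congr_left
    intro k hk
    simp only [Function.comp_apply, Prod.mk.injEq, true_and]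
    rw [PySem.Dict.getD_eq_get?_getD, get?_update n.items e hln k, get?_eq_lkp, hgetD k]
    cases hv : lkp k e.items with
    | some v =>
      cases hw : lkp k n.items with
      | some w => simp [hnc k v w hv hw]
      | none => simp
    | none =>
      have hkn : k ∈ n.items.map Prod.fst := by
        rcases (PySem.Set.mem_update _ _ _).mp hk with h | h
        · exact absurd ((lkp_isSome_iff k e.items).mpr h) (by simp [hv])
        · exact h
      obtain ⟨w, hw⟩ := Option.isSome_iff_exists.mp ((lkp_isSome_iff k n.items).mpr hkn)
      simp [hw]
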